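-- pv_equiv track=rewrite | github.com/primihub/primihub | python/primihub/new_FL/example/dev_example_submit_task.py | generate_para_map
-- ===== SOURCE A (Python) =====
-- from copy import deepcopy
--
-- def generate_para_map(task_parameter, data, roles):
--     party2role = dict()
--     tmp_party_list = []
--     for role, party_list in roles.items():
--             for party in party_list:
--                 party2role[party] = role
--                 tmp_party_list.append(party)
--
--     #set the paramap
--     para_map = {}
--     for party in tmp_party_list:
--         tmp_param = deepcopy(task_parameter)
--         tmp_param['role'] = party2role[party]
--         tmp_param['data'] = data[party]
--         para_map[party] = tmp_param
--
--     return para_map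
-- ===== SOURCE B (Python) =====
-- from copy import deepcopy
--
-- def generate_para_map(task_parameter, data, roles):
--     para_map = {}
--     for role, party_list in roles.items():
--         for party in party_list:
--             tmp_param = deepcopy(task_parameter)
--             tmp_param['role'] = role
--             tmp_param['data'] = data[party]
--             para_map[party] = tmp_param
--     return para_map
-- ===== Notes on version B (the rewrite author's own statement) =====
-- stated objective: simpler
-- what changed: Drops A's first pass (the party2role inverted index and tmp_party_list) and builds para_map directly in one nested loop over roles, using the current role instead of a later index lookup; last-wins dict overwrite makes this agree with A even when a party occurs under several roles.
import Mathlib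
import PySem

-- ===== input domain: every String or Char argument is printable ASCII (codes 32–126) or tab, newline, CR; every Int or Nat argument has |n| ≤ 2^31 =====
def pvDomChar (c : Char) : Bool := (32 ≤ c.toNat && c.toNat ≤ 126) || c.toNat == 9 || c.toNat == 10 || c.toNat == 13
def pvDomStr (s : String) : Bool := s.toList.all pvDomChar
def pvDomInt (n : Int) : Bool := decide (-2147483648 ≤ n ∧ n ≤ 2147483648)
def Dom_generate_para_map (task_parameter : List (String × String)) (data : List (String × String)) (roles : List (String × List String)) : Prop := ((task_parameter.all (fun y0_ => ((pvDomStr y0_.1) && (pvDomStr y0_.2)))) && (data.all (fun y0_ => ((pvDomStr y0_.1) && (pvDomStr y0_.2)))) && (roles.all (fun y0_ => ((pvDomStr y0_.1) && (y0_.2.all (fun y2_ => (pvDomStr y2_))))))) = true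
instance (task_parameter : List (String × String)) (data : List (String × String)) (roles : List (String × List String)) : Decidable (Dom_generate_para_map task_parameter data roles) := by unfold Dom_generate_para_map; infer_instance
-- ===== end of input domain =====

-- B drops A's first pass (the party2role index and tmp_party_list) and builds para_map in one
-- nested loop over roles, using the current role directly; objective: simpler.

-- ===== PORT A =====
-- the value stored for a party: deepcopy(task_parameter); tmp['role'] = role; tmp['data'] = data[party]
-- (data[party] ported as getD with "" default: Pre_ guarantees the key is present, Python raises otherwise)
def pvVal (task_parameter : List (String × String)) (data : List (String × String)) (party role : String) : List (String × String) :=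
  (((PySem.Dict.ofList task_parameter).insert "role" role).insert "data"
     ((PySem.Dict.ofList data).getD party "")).items

def generate_para_map (task_parameter : List (String × String)) (data : List (String × String)) (roles : List (String × List String)) : List (String × List (String × String)) :=
  -- first pass: party2role index and tmp_party_list
  let st := roles.foldl
      (fun (st : PySem.Dict String String × List String) rp =>
        rp.2.foldl (fun st party => (st.1.insert party rp.1, st.2 ++ [party])) st)
      (PySem.Dict.empty, [])
  let party2role := st.1
  let tmp_party_list := st.2
  -- second pass: set the paramap
  let para_map := tmp_party_list.foldl
      (fun pm party => pm.insert party (pvVal task_parameter data party (party2role.getD party "")))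
      (PySem.Dict.empty : PySem.Dict String (List (String × String)))
  para_map.items

-- ===== PORT B =====
def generate_para_map_alt (task_parameter : List (String × String)) (data : List (String × String)) (roles : List (String × List String)) : List (String × List (String × String)) :=
  (roles.foldl
      (fun (pm : PySem.Dict String (List (String × String))) rp =>
        rp.2.foldl (fun pm party => pm.insert party (pvVal task_parameter data party rp.1)) pm)
      PySem.Dict.empty).items

-- ===== PRECONDITION & SPEC =====
-- Pre_ excludes exactly the inputs on which A raises KeyError: a party listed under some role
-- that is not a key of data.
def Pre_generate_para_map (task_parameter : List (String × String)) (data : List (String × String)) (roles : List (String × List String)) : Prop :=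
  (roles.all (fun rp => rp.2.all (fun party => (PySem.Dict.ofList data).contains party))) = true
instance (task_parameter : List (String × String)) (data : List (String × String)) (roles : List (String × List String)) : Decidable (Pre_generate_para_map task_parameter data roles) := by unfold Pre_generate_para_map; infer_instance

def pvWitness_generate_para_map : (List (String × String)) × (List (String × String)) × (List (String × List String)) :=
  ([("k", "v")], [("alice", "d1"), ("bob", "d2")], [("host", ["alice"]), ("guest", ["bob"])])

def Spec_generate_para_map (task_parameter : List (String × String)) (data : List (String × String)) (roles : List (String × List String)) (out : List (String × List (String × String))) : Prop := out = generate_para_map_alt task_parameter data roles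
instance (task_parameter : List (String × String)) (data : List (String × String)) (roles : List (String × List String)) (out : List (String × List (String × String))) : Decidable (Spec_generate_para_map task_parameter data roles out) := by unfold Spec_generate_para_map; infer_instance

-- ===== CLAIM (what is proved, stated in full; the proofs are below) =====
def Claim_equal_generate_para_map : Prop := ∀ (task_parameter : List (String × String)) (data : List (String × String)) (roles : List (String × List String)), Dom_generate_para_map task_parameter data roles → Pre_generate_para_map task_parameter data roles → Spec_generate_para_map task_parameter data roles (generate_para_map task_parameter data roles)

-- ===== LEMMAS AND PROOFS =====

-- the flattened (party, role) stream both programs traverse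
def pvFlat (roles : List (String × List String)) : List (String × String) :=
  roles.flatMap (fun rp => rp.2.map (fun p => (p, rp.1)))

-- A's first pass computed on the flattened stream
theorem pvPass1_inner (r : String) (ps : List String) (d : PySem.Dict String String) (l : List String) :
    ps.foldl (fun st party => (st.1.insert party r, st.2 ++ [party])) (d, l)
      = (ps.foldl (fun d p => d.insert p r) d, l ++ ps) := by
  induction ps generalizing d l with
  | nil => simp
  | cons p t ih => simp [List.foldl_cons, ih]

theorem pvPass1 (roles : List (String × List String)) (d : PySem.Dict String String) (l : List String) :
    roles.foldl
      (fun (st : PySem.Dict String String × List String) rp =>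
        rp.2.foldl (fun st party => (st.1.insert party rp.1, st.2 ++ [party])) st)
      (d, l)
      = ((pvFlat roles).foldl (fun d pr => d.insert pr.1 pr.2) d, l ++ (pvFlat roles).map (·.1)) := by
  induction roles generalizing d l with
  | nil => simp [pvFlat]
  | cons rp t ih =>
      simp only [List.foldl_cons, pvPass1_inner, ih, pvFlat, List.flatMap_cons,
        List.foldl_append, List.map_append, List.map_map, List.append_assoc, List.foldl_map]
      simp [Function.comp_def]

-- B computed on the flattened stream
theorem pvB_flat (tp data : List (String × String)) (roles : List (String × List String))
    (pm : PySem.Dict String (List (String × String))) :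
    roles.foldl
      (fun pm rp => rp.2.foldl (fun pm party => pm.insert party (pvVal tp data party rp.1)) pm) pm
      = (pvFlat roles).foldl (fun pm pr => pm.insert pr.1 (pvVal tp data pr.1 pr.2)) pm := by
  induction roles generalizing pm with
  | nil => simp [pvFlat]
  | cons rp t ih =>
      simp only [List.foldl_cons, ih, pvFlat, List.flatMap_cons, List.foldl_append, List.foldl_map]

-- two dicts with the same key sequence that may disagree only at key p
def pvAgreeExc (p : String) (d₁ d₂ : PySem.Dict String (List (String × String))) : Prop :=
  List.Forall₂ (fun a b => a.1 = b.1 ∧ (a.1 ≠ p → a.2 = b.2)) d₁.items d₂.items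

theorem pvForall₂_append {α β : Type} {R : α → β → Prop} {l₁ l₃ : List α} {l₂ l₄ : List β}
    (h : List.Forall₂ R l₁ l₂) (h2 : List.Forall₂ R l₃ l₄) : List.Forall₂ R (l₁ ++ l₃) (l₂ ++ l₄) := by
  induction h with
  | nil => exact h2
  | cons ha _ ih => exact List.Forall₂.cons ha ih

theorem pvKeys_eq_list {p : String} {l₁ l₂ : List (String × List (String × String))}
    (h : List.Forall₂ (fun a b => a.1 = b.1 ∧ (a.1 ≠ p → a.2 = b.2)) l₁ l₂) :
    l₁.map (·.1) = l₂.map (·.1) := by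
  induction h with
  | nil => rfl
  | cons ha _ ih => simp [ha.1, ih]

theorem pvContains_eq {p : String} {d₁ d₂ : PySem.Dict String (List (String × String))}
    (h : pvAgreeExc p d₁ d₂) (k : String) : d₁.contains k = d₂.contains k := by
  rw [PySem.Dict.contains_eq_decide_mem_keys, PySem.Dict.contains_eq_decide_mem_keys]
  simp only [PySem.Dict.keys]
  congr 1
  rw [pvKeys_eq_list h]

theorem pvForall₂_map {p k : String} {v : List (String × String)}
    {l₁ l₂ : List (String × List (String × String))}
    (h : List.Forall₂ (fun a b => a.1 = b.1 ∧ (a.1 ≠ p → a.2 = b.2)) l₁ l₂) :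
    List.Forall₂ (fun a b => a.1 = b.1 ∧ (a.1 ≠ p → a.2 = b.2))
      (l₁.map (fun q => if q.1 == k then (k, v) else q))
      (l₂.map (fun q => if q.1 == k then (k, v) else q)) := by
  induction h with
  | nil => exact List.Forall₂.nil
  | @cons a b t₁ t₂ ha _ ih =>
      refine List.Forall₂.cons ?_ ih
      by_cases he : a.1 = k
      · simp [he, ← ha.1]
      · simpa [he, ← ha.1] using ha
  
theorem pvMap_eq {p : String} {v : List (String × String)}
    {l₁ l₂ : List (String × List (String × String))}
    (h : List.Forall₂ (fun a b => a.1 = b.1 ∧ (a.1 ≠ p → a.2 = b.2)) l₁ l₂) :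
    l₁.map (fun q => if q.1 == p then (p, v) else q)
      = l₂.map (fun q => if q.1 == p then (p, v) else q) := by
  induction h with
  | nil => rfl
  | @cons a b t₁ t₂ ha _ ih =>
      simp only [List.map_cons, ih]
      congr 1
      by_cases he : a.1 = p
      · simp [he, ← ha.1]
      · simp only [← ha.1]
        simp [Prod.ext ha.1 (ha.2 he)]

theorem pvList_eq_of_not_mem {p : String}
    {l₁ l₂ : List (String × List (String × String))}
    (h : List.Forall₂ (fun a b => a.1 = b.1 ∧ (a.1 ≠ p → a.2 = b.2)) l₁ l₂)
    (hp : p ∉ l₁.map (·.1)) : l₁ = l₂ := by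
  induction h with
  | @cons a b t₁ t₂ ha _ ih =>
      simp only [List.map_cons, List.mem_cons, not_or] at hp
      rw [ih hp.2]
      congr 1
      exact Prod.ext ha.1 (ha.2 (fun he => hp.1 he.symm))
  | nil => rfl

theorem pvAgreeExc_insert {p : String} {d₁ d₂ : PySem.Dict String (List (String × String))}
    (h : pvAgreeExc p d₁ d₂) (k : String) (v : List (String × String)) :
    pvAgreeExc p (d₁.insert k v) (d₂.insert k v) := by
  have hc0 := pvContains_eq h k
  unfold pvAgreeExc at h ⊢
  rw [PySem.Dict.items_insert, PySem.Dict.items_insert, hc0]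
  by_cases hc : d₂.contains k = true
  · simp only [hc, if_true]
    exact pvForall₂_map h
  · simp only [hc]
    exact pvForall₂_append h (List.Forall₂.cons ⟨rfl, fun _ => rfl⟩ List.Forall₂.nil)

theorem pvAgreeExc_insert_self (p : String) (d : PySem.Dict String (List (String × String)))
    (v w : List (String × String)) :
    pvAgreeExc p (d.insert p v) (d.insert p w) := by
  unfold pvAgreeExc
  rw [PySem.Dict.items_insert, PySem.Dict.items_insert]
  by_cases hc : d.contains p = true
  · simp only [hc, if_true]
    induction d.items with
    | nil => exact List.Forall₂.nil
    | cons a t ih =>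
        refine List.Forall₂.cons ?_ ih
        by_cases he : a.1 = p
        · simp [he]
        · simp [he]
  · simp only [hc]
    refine pvForall₂_append ?_
      (List.Forall₂.cons ⟨rfl, fun hne => absurd rfl hne⟩ List.Forall₂.nil)
    exact (List.forall₂_same).mpr (fun a _ => ⟨rfl, fun _ => rfl⟩)

theorem pvEq_of_agree_insert {p : String} {d₁ d₂ : PySem.Dict String (List (String × String))}
    (h : pvAgreeExc p d₁ d₂) (v : List (String × String)) :
    d₁.insert p v = d₂.insert p v := by
  apply PySem.Dict.ext
  have hc0 := pvContains_eq h p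
  unfold pvAgreeExc at h
  rw [PySem.Dict.items_insert, PySem.Dict.items_insert, hc0]
  by_cases hc : d₂.contains p = true
  · simp only [hc, if_true]
    exact pvMap_eq h
  · simp only [hc]
    have hnp : p ∉ d₂.items.map (·.1) := by
      rw [PySem.Dict.contains_eq_decide_mem_keys] at hc
      simpa [PySem.Dict.keys] using hc
    rw [pvList_eq_of_not_mem h (by rw [pvKeys_eq_list h]; exact hnp)]

-- a later re-insert of key p makes the initial value at p irrelevant
theorem pvIrrel (g : String → List (String × String)) (ks : List String) (p : String)
    (d₁ d₂ : PySem.Dict String (List (String × String)))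
    (hp : p ∈ ks) (h : pvAgreeExc p d₁ d₂) :
    ks.foldl (fun pm q => pm.insert q (g q)) d₁ = ks.foldl (fun pm q => pm.insert q (g q)) d₂ := by
  induction ks generalizing d₁ d₂ with
  | nil => cases hp
  | cons q t ih =>
      simp only [List.foldl_cons]
      by_cases hq : q = p
      · subst hq; rw [pvEq_of_agree_insert h]
      · rcases List.mem_cons.mp hp with h1 | h1
        · exact absurd h1.symm hq
        · exact ih _ _ h1 (pvAgreeExc_insert h q (g q))

-- p not later in the stream ⇒ the index at p is already settled
theorem pvGet_foldl_not_mem (l : List (String × String)) (p : String)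
    (d : PySem.Dict String String) (hp : p ∉ l.map (·.1)) :
    (l.foldl (fun d pr => d.insert pr.1 pr.2) d).get? p = d.get? p := by
  induction l generalizing d with
  | nil => rfl
  | cons pr t ih =>
      simp only [List.map_cons, List.mem_cons, not_or] at hp
      simp only [List.foldl_cons]
      rw [ih _ hp.2, PySem.Dict.get?_insert_of_ne _ _ hp.1]

-- main bridge: B's single pass over the stream equals A's second pass driven by the final index
theorem pvMain (tp data : List (String × String)) (l : List (String × String))
    (d : PySem.Dict String String) (pm : PySem.Dict String (List (String × String))) :
    l.foldl (fun pm pr => pm.insert pr.1 (pvVal tp data pr.1 pr.2)) pm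
      = (l.map (·.1)).foldl
          (fun pm p => pm.insert p (pvVal tp data p
            ((l.foldl (fun d pr => d.insert pr.1 pr.2) d).getD p ""))) pm := by
  induction l generalizing d pm with
  | nil => rfl
  | cons pr t ih =>
      simp only [List.foldl_cons, List.map_cons]
      rw [ih (d.insert pr.1 pr.2)]
      by_cases hp : pr.1 ∈ t.map (·.1)
      · exact pvIrrel _ _ _ _ _ hp (pvAgreeExc_insert_self _ _ _ _)
      · rw [show (t.foldl (fun d pr => d.insert pr.1 pr.2) (d.insert pr.1 pr.2)).getD pr.1 "" = pr.2 by
          rw [PySem.Dict.getD_eq_get?_getD, pvGet_foldl_not_mem t pr.1 _ hp,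
            PySem.Dict.get?_insert_self]; rfl]

-- ===== VERDICT (by name: the statement is the Claim_ definition above) =====
theorem generate_para_map_spec : Claim_equal_generate_para_map := by
  intro tp data roles _ _
  unfold Spec_generate_para_map generate_para_map generate_para_map_alt
  rw [pvPass1, pvB_flat, pvMain tp data (pvFlat roles) PySem.Dict.empty]
  simp
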